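-- pv_equiv track=rewrite | github.com/lypnol/adventofcode-2019 | day-04/part-1/silvestre.py | meet_criteria
-- ===== SOURCE A (Python) =====
-- def meet_criteria(n):
--     n_str = str(n)
--     n = len(n_str)
--
--     if n != 6:
--         return False
--
--     has_dup = False
--     previous_d = n_str[0]
--     for d in n_str[1:]:
--         if previous_d > d:
--             return False
--         elif previous_d == d:
--             has_dup=True
--         previous_d = d
--     return has_dup
-- ===== SOURCE B (Python) =====
-- def meet_criteria(n):
--     s = str(n)
--     if len(s) != 6:
--         return False
--     return s == ''.join(sorted(s)) and any(a == b for a, b in zip(s, s[1:]))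
-- ===== Notes on version B (the rewrite author's own statement) =====
-- stated objective: simpler
-- what changed: Replaces A's single stateful scan (early return on decrease, has_dup flag) with two independent passes: non-decreasing checked by comparing the string with its sorted form, adjacent duplicate by any() over zipped neighbours.
import Mathlib
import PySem

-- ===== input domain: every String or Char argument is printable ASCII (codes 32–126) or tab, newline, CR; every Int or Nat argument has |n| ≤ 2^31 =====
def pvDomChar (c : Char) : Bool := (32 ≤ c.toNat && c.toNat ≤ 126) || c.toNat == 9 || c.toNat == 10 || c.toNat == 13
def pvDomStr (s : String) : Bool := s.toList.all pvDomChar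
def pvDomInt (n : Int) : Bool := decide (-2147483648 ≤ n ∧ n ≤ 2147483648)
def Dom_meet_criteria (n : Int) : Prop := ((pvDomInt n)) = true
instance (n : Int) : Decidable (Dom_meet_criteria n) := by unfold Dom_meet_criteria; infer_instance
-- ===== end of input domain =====

-- B replaces A's single stateful scan with two independent passes (sorted-string comparison + zip-any); objective: simpler.

-- ===== PORT A =====
-- the for-loop over n_str[1:] with state (previous_d, has_dup), early return False on decrease
def meetLoopA : Char → List Char → Bool → Bool
  | _, [], has_dup => has_dup
  | previous_d, d :: rest, has_dup =>
    if previous_d > d then false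
    else if previous_d == d then meetLoopA d rest true
    else meetLoopA d rest has_dup

def meet_criteria (n : Int) : Bool :=
  let n_str := (PySem.Int.toStr n).toList
  if n_str.length ≠ 6 then false
  else
    match n_str with
    | [] => false   -- unreachable: length = 6
    | c :: rest => meetLoopA c rest false

-- ===== PORT B =====
def meet_criteria_alt (n : Int) : Bool :=
  let s := (PySem.Int.toStr n).toList
  if s.length ≠ 6 then false
  else
    decide (s = PySem.List.sorted s (fun x => x) false)
      && (s.zip (s.drop 1)).any (fun ab => ab.1 == ab.2)

-- ===== PRECONDITION & SPEC =====
def Spec_meet_criteria (n : Int) (out : Bool) : Prop := out = meet_criteria_alt n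
instance (n : Int) (out : Bool) : Decidable (Spec_meet_criteria n out) := by unfold Spec_meet_criteria; infer_instance

-- ===== CLAIM (what is proved, stated in full; the proofs are below) =====
def Claim_equal_meet_criteria : Prop := ∀ (n : Int), Dom_meet_criteria n → Spec_meet_criteria n (meet_criteria n)

-- ===== LEMMAS AND PROOFS =====

-- A's loop computes: "the chain is non-decreasing" and then "dup flag or some adjacent pair equal"
theorem meetLoopA_eq (l : List Char) (p : Char) (dup : Bool) :
    meetLoopA p l dup =
      if (p :: l).IsChain (· ≤ ·)
      then (dup || ((p :: l).zip l).any (fun ab => ab.1 == ab.2))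
      else false := by
  induction l generalizing p dup with
  | nil => simp [meetLoopA]
  | cons d rest ih =>
    rcases lt_trichotomy p d with hlt | heq | hgt
    · have h1 : ¬ p > d := not_lt_of_gt hlt
      have h2 : p ≠ d := ne_of_lt hlt
      have hb : (p == d) = false := beq_eq_false_iff_ne.mpr h2
      simp only [meetLoopA, if_neg h1, beq_iff_eq, if_neg h2, ih]
      simp [List.isChain_cons_cons, le_of_lt hlt, hb]
    · subst heq
      simp only [meetLoopA, gt_iff_lt, lt_irrefl, if_false, beq_self_eq_true, if_true, ih]
      simp [List.isChain_cons_cons]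
    · have h1 : p > d := hgt
      have h2 : ¬ p ≤ d := not_le_of_gt hgt
      simp [meetLoopA, if_pos h1, List.isChain_cons_cons, h2]

theorem eq_sorted_iff_pairwise (s : List Char) :
    (s = PySem.List.sorted s (fun x => x) false) ↔ s.Pairwise (· ≤ ·) := by
  constructor
  · intro h
    have := PySem.List.sorted_pairwise (xs := s) (key := fun x => x)
    rw [← h] at this
    simpa using this
  · intro h
    exact (PySem.List.sorted_eq_self_of_pairwise s (fun x => x) (by simpa using h)).symm

-- ===== VERDICT (by name: the statement is the Claim_ definition above) =====
theorem meet_criteria_spec : Claim_equal_meet_criteria := by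
  intro n _
  unfold Spec_meet_criteria meet_criteria meet_criteria_alt
  set s := (PySem.Int.toStr n).toList with hs
  by_cases hlen : s.length ≠ 6
  · simp [hlen]
  · simp only [hlen, ite_false]
    rw [not_not] at hlen
    match s, hlen with
    | c :: rest, hlen =>
      simp only [meetLoopA_eq, List.drop_one, List.tail_cons]
      have hd : (decide ((c :: rest) = PySem.List.sorted (c :: rest) (fun x => x) false))
            = decide ((c :: rest).IsChain (· ≤ ·)) :=
        decide_eq_decide.mpr
          ((eq_sorted_iff_pairwise (c :: rest)).trans List.isChain_iff_pairwise.symm)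
      rw [hd]
      by_cases hc : (c :: rest).IsChain (· ≤ ·) <;> simp [hc]
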